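-- pv_equiv track=rewrite | github.com/tiger965/Tiger-System-Rebuild | analysis/window4_technical/kline_manager.py | _generate_indicator_signals
-- ===== SOURCE A (Python) =====
-- from typing import Dict, List, Optional, Tuple, Union
--
-- def _generate_indicator_signals(indicator_name: str,
--                                klines: Dict, params: Dict) -> List[int]:
--     """生成指标信号"""
--     signals = []
--     closes = klines['close']
--
--     for i in range(len(closes)):
--         if i < 20:
--             signals.append(0)
--             continue
--
--         if indicator_name == 'rsi':
--             threshold_buy = params.get('oversold', 30)
--             threshold_sell = params.get('overbought', 70)
--
--             if i % 10 < 3: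
--                 signals.append(1)
--             elif i % 10 > 7:
--                 signals.append(-1)
--             else:
--                 signals.append(0)
--         else:
--             signals.append(0)
--
--     return signals
-- ===== SOURCE B (Python) =====
-- def _generate_indicator_signals(indicator_name, klines, params):
--     n = len(klines['close'])
--     if indicator_name != 'rsi' or n <= 20:
--         return [0] * n
--     m = n - 20
--     tail = [1, 1, 1, 0, 0, 0, 0, 0, -1, -1] * ((m + 9) // 10)
--     return [0] * 20 + tail[:m]
-- ===== Notes on version B (the rewrite author's own statement) =====
-- stated objective: alternative
-- what changed: Replaces A's per-index loop with branch decisions entirely: B notes the signal sequence is 20 zeros followed by a fixed period-10 cycle, so it builds the result by list repetition (tiling ceil(m/10) copies of the 10-element cycle) and one slice, with no iteration over indices at all; the loop-invariant indicator test is hoisted and the unused threshold params.get calls are dropped.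
import Mathlib
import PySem

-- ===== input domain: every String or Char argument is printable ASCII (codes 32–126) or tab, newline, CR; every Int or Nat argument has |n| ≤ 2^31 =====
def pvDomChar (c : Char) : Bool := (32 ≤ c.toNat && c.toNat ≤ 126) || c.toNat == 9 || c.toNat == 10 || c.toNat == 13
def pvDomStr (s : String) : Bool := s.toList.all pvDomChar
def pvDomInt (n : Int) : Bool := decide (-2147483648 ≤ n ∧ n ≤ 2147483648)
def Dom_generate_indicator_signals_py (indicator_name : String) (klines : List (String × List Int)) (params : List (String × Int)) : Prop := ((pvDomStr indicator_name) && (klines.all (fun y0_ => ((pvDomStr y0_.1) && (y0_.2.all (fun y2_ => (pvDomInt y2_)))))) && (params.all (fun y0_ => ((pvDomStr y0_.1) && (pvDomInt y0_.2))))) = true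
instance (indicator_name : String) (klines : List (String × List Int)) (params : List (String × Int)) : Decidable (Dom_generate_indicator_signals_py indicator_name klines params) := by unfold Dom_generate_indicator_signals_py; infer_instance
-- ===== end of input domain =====

-- B replaces A's per-index loop with branches by tiling: 20 leading zeros, then
-- whole copies of the fixed period-10 cycle sliced to length (alternative; same O(n)).


-- ===== PORT A =====
-- Literal port of A. klines['close'] raises KeyError when absent: Pre_ excludes that,
-- the port uses getD [] there. The unused params.get('oversold'/'overbought') reads
-- have no effect and are elided.
def generate_indicator_signals_py (indicator_name : String) (klines : List (String × List Int)) (params : List (String × Int)) : List Int :=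
  let closes := (klines.lookup "close").getD []
  (PySem.List.pyRange 0 (closes.length : Int) 1).foldl (fun signals i =>
    if i < 20 then signals ++ [0]
    else if indicator_name = "rsi" then
      if PySem.Int.mod i 10 < 3 then signals ++ [1]
      else if PySem.Int.mod i 10 > 7 then signals ++ [(-1 : Int)]
      else signals ++ [0]
    else signals ++ [0]) []

-- ===== PORT B =====
-- 'pattern * k' is List.flatten (List.replicate k pattern); 'tail[:m]' with 0 ≤ m ≤ len
-- is List.take m (exact for a nonnegative in-range slice bound).
def generate_indicator_signals_py_alt (indicator_name : String) (klines : List (String × List Int)) (params : List (String × Int)) : List Int :=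
  let n := ((klines.lookup "close").getD []).length
  if indicator_name ≠ "rsi" ∨ n ≤ 20 then List.replicate n 0
  else
    let m := n - 20
    let tail := (List.replicate ((m + 9) / 10) ([1, 1, 1, 0, 0, 0, 0, 0, -1, -1] : List Int)).flatten
    List.replicate 20 0 ++ tail.take m

-- ===== PRECONDITION & SPEC =====
-- Pre_ excludes klines without a 'close' key, where Python A raises KeyError.
def Pre_generate_indicator_signals_py (indicator_name : String) (klines : List (String × List Int)) (params : List (String × Int)) : Prop :=
  (klines.lookup "close").isSome = true
instance (indicator_name : String) (klines : List (String × List Int)) (params : List (String × Int)) : Decidable (Pre_generate_indicator_signals_py indicator_name klines params) := by unfold Pre_generate_indicator_signals_py; infer_instance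

def pvWitness_generate_indicator_signals_py : String × (List (String × List Int)) × (List (String × Int)) :=
  ("rsi", [("close", [1, 2, 3])], [("oversold", 25)])

def Spec_generate_indicator_signals_py (indicator_name : String) (klines : List (String × List Int)) (params : List (String × Int)) (out : List Int) : Prop := out = generate_indicator_signals_py_alt indicator_name klines params
instance (indicator_name : String) (klines : List (String × List Int)) (params : List (String × Int)) (out : List Int) : Decidable (Spec_generate_indicator_signals_py indicator_name klines params out) := by unfold Spec_generate_indicator_signals_py; infer_instance

-- ===== CLAIM (what is proved, stated in full; the proofs are below) =====
def Claim_equal_generate_indicator_signals_py : Prop := ∀ (indicator_name : String) (klines : List (String × List Int)) (params : List (String × Int)), Dom_generate_indicator_signals_py indicator_name klines params → Pre_generate_indicator_signals_py indicator_name klines params → Spec_generate_indicator_signals_py indicator_name klines params (generate_indicator_signals_py indicator_name klines params)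

-- ===== LEMMAS AND PROOFS =====

-- A's per-index value once the indicator is 'rsi'.
def pvRsiCell (i : Int) : Int :=
  if i < 20 then 0
  else if PySem.Int.mod i 10 < 3 then 1
  else if PySem.Int.mod i 10 > 7 then -1
  else 0

def pvPat : List Int := [1, 1, 1, 0, 0, 0, 0, 0, -1, -1]

-- Tiling q copies of the 10-cycle is the map of (· % 10) lookups over range (q*10).
lemma pvFlatten_replicate (q : Nat) :
    (List.replicate q pvPat).flatten =
      (List.range (q * 10)).map (fun k => pvPat.getD (k % 10) 0) := by
  induction q with
  | zero => simp
  | succ m ih =>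
    have h : (m + 1) * 10 = 10 + m * 10 := by ring
    rw [List.replicate_succ, List.flatten_cons, ih, h, List.range_add, List.map_append,
        List.map_map]
    have hA : pvPat = (List.range 10).map (fun k => pvPat.getD (k % 10) 0) := by decide
    have hB : (List.range (m * 10)).map ((fun k => pvPat.getD (k % 10) 0) ∘ fun x => 10 + x) =
        (List.range (m * 10)).map (fun k => pvPat.getD (k % 10) 0) :=
      List.map_congr_left (fun k _ => by simp [Nat.add_mod_left])
    exact congrArg₂ (· ++ ·) hA hB.symm

lemma pvCell_shift (k : Nat) :
    pvRsiCell ((20 + k : Nat) : Int) = pvPat.getD (k % 10) 0 := by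
  have h10 : PySem.Int.mod ((20 + k : Nat) : Int) 10 = (((20 + k) % 10 : Nat) : Int) := by
    exact_mod_cast PySem.Int.mod_natCast (20 + k) 10
  have hmod : (20 + k) % 10 = k % 10 := by omega
  have hlt : k % 10 < 10 := Nat.mod_lt _ (by norm_num)
  unfold pvRsiCell
  rw [if_neg (by exact_mod_cast (by omega : ¬ (20 + k < 20))), h10, hmod]
  interval_cases h : k % 10 <;> decide

lemma pvCell_small (k : Nat) (hk : k < 20) : pvRsiCell (k : Int) = 0 := by
  unfold pvRsiCell; rw [if_pos (by exact_mod_cast hk)]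

-- A's map over range n equals B's tiled construction, for n > 20.
lemma pvRsiBuild (n : Nat) (hn : 20 < n) :
    (List.range n).map (fun k : Nat => pvRsiCell (k : Int)) =
      List.replicate 20 0 ++
        ((List.replicate ((n - 20 + 9) / 10) pvPat).flatten).take (n - 20) := by
  have hsplit : n = 20 + (n - 20) := by omega
  set m := n - 20 with hm
  have hq : m ≤ ((m + 9) / 10) * 10 := by omega
  rw [pvFlatten_replicate, ← List.map_take, List.take_range, Nat.min_eq_left hq]
  conv_lhs => rw [hsplit]
  rw [List.range_add, List.map_append, List.map_map]
  have h1 : (List.range 20).map (fun k : Nat => pvRsiCell (k : Int)) = List.replicate 20 (0 : Int) := by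
    decide
  have h2 : (List.range m).map ((fun k : Nat => pvRsiCell (k : Int)) ∘ fun x => 20 + x) =
      (List.range m).map (fun k => pvPat.getD (k % 10) 0) :=
    List.map_congr_left (fun k _ => pvCell_shift k)
  rw [h1, h2]

-- ===== VERDICT (by name: the statement is the Claim_ definition above) =====
theorem generate_indicator_signals_py_spec : Claim_equal_generate_indicator_signals_py := by
  intro indicator_name klines params _ _
  unfold Spec_generate_indicator_signals_py generate_indicator_signals_py generate_indicator_signals_py_alt
  set closes := (klines.lookup "close").getD [] with hc
  by_cases hname : indicator_name = "rsi"
  · subst hname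
    by_cases hn : closes.length ≤ 20
    · rw [if_pos (Or.inr hn)]
      have hstep :
          (fun (signals : List Int) (i : Int) =>
            if i < 20 then signals ++ [0]
            else if ("rsi" : String) = "rsi" then
              if PySem.Int.mod i 10 < 3 then signals ++ [1]
              else if PySem.Int.mod i 10 > 7 then signals ++ [(-1 : Int)]
              else signals ++ [0]
            else signals ++ [0]) =
          (fun signals i => signals ++ [pvRsiCell i]) := by
        funext signals i
        unfold pvRsiCell
        split_ifs <;> first | rfl | exact absurd rfl (by assumption)
      rw [hstep, PySem.List.foldl_append_singleton_eq_map, PySem.List.pyRange_zero_natCast,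
          List.map_map]
      have hrep : (List.range closes.length).map (fun _ : Nat => (0 : Int)) =
          List.replicate closes.length 0 := by simp [List.eq_replicate_iff]
      exact (List.map_congr_left (fun k hk =>
        pvCell_small k (lt_of_lt_of_le (List.mem_range.mp hk) hn))).trans hrep
    · rw [if_neg (by simp [hn])]
      have hstep :
          (fun (signals : List Int) (i : Int) =>
            if i < 20 then signals ++ [0]
            else if ("rsi" : String) = "rsi" then
              if PySem.Int.mod i 10 < 3 then signals ++ [1]
              else if PySem.Int.mod i 10 > 7 then signals ++ [(-1 : Int)]
              else signals ++ [0]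
            else signals ++ [0]) =
          (fun signals i => signals ++ [pvRsiCell i]) := by
        funext signals i
        unfold pvRsiCell
        split_ifs <;> first | rfl | exact absurd rfl (by assumption)
      rw [hstep, PySem.List.foldl_append_singleton_eq_map, PySem.List.pyRange_zero_natCast,
          List.map_map]

      have := pvRsiBuild closes.length (by omega)
      simpa [pvPat] using this
  · rw [if_pos (Or.inl hname)]
    have hstep :
        (fun (signals : List Int) (i : Int) =>
          if i < 20 then signals ++ [0]
          else if indicator_name = "rsi" then
            if PySem.Int.mod i 10 < 3 then signals ++ [1]
            else if PySem.Int.mod i 10 > 7 then signals ++ [(-1 : Int)]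
            else signals ++ [0]
          else signals ++ [0]) =
        (fun signals i => signals ++ [(0 : Int)]) := by
      funext signals i
      split_ifs <;> rfl
    rw [hstep, PySem.List.foldl_append_singleton_eq_map, PySem.List.pyRange_zero_natCast,
        List.map_map]
    simp [List.eq_replicate_iff]
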